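-- pv_equiv track=rewrite | github.com/kit-cel/gr-lte | python/lte_test/lte_core.py | pn_generator
-- ===== SOURCE A (Python) =====
-- import math
--
-- def pn_generator(vector_len, cinit):
--     NC = 1600
--     vec_len = vector_len
--     if vector_len < 32:
--         vec_len = 32
--     x2 = [0] * (3 * vec_len + NC)
--     for i in range(31):
--         x2[i] = cinit % 2
--         cinit = int(math.floor(cinit / 2))
--     x1 = [0] * (3 * vec_len + NC)
--     x1[0] = 1
--     for n in range(2 * vec_len + NC - 3):
--         x1[n + 31] = (x1[n + 3] + x1[n]) % 2
--         x2[n + 31] = (x2[n + 3] + x2[n + 2] + x2[n + 1] + x2[n]) % 2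
--     output = [0] * vector_len
--     for n in range(vector_len):
--         output[n] = (x1[n + NC] + x2[n + NC]) % 2
--     return output
-- ===== SOURCE B (Python) =====
-- def _step(x1, x2):
--     # advance both 31-bit registers by one position
--     return (x1[1:] + [(x1[3] + x1[0]) % 2],
--             x2[1:] + [(x2[3] + x2[2] + x2[1] + x2[0]) % 2])
--
-- def pn_generator(vector_len, cinit):
--     NC = 1600
--     x1 = [1] + [0] * 30
--     x2 = []
--     c = cinit
--     for _ in range(31):
--         x2.append(c % 2)
--         c = c // 2
--     for _ in range(NC):
--         x1, x2 = _step(x1, x2)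
--     out = []
--     for _ in range(vector_len):
--         out.append((x1[0] + x2[0]) % 2)
--         x1, x2 = _step(x1, x2)
--     return out
-- ===== Notes on version B (the rewrite author's own statement) =====
-- stated objective: alternative
-- what changed: A fills one big absolute-indexed scratch array of size 3*vec_len+NC for each LFSR and then reads a slice of it; B keeps only two 31-element sliding registers, advancing them one step at a time through the NC warm-up and the output phase, so only bounded state is maintained.
import Mathlib
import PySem

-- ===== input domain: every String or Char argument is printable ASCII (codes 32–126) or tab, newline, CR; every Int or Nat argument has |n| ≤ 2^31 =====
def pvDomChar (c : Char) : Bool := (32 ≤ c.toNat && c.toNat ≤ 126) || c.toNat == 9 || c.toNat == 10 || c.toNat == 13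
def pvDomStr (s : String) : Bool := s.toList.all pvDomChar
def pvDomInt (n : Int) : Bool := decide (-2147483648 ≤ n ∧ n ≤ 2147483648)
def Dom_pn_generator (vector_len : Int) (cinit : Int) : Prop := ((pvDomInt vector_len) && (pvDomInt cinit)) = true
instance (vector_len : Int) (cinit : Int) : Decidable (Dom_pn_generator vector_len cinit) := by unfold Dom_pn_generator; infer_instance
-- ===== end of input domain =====

-- B replaces A's three absolute-indexed scratch arrays of size 3*vec_len+NC by two 31-element
-- sliding registers advanced step by step (alternative structure, same exact output).

-- ===== PORT A =====
-- loop bodies of A's three for-loops, named for the proofs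
def pnA_seed (p : List Int × Int) (i : Nat) : List Int × Int :=
  (p.1.set i (PySem.Int.mod p.2 2), PySem.Int.floordiv p.2 2)

def pnA_fill (p : List Int × List Int) (n : Nat) : List Int × List Int :=
  (p.1.set (n+31) (PySem.Int.mod (p.1.getD (n+3) 0 + p.1.getD n 0) 2),
   p.2.set (n+31) (PySem.Int.mod (p.2.getD (n+3) 0 + p.2.getD (n+2) 0 + p.2.getD (n+1) 0 + p.2.getD n 0) 2))

def pn_generator (vector_len : Int) (cinit : Int) : List Int :=
  let vec_len : Int := if vector_len < 32 then 32 else vector_len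
  let L : Nat := (3 * vec_len + 1600).toNat
  -- int(math.floor(cinit / 2)) is exact floor division on the stated domain (|cinit| ≤ 2^31 < 2^53)
  let x2 := ((List.range 31).foldl pnA_seed (List.replicate L 0, cinit)).1
  let x1 := (List.replicate L (0:Int)).set 0 1
  let q := (List.range (2 * vec_len + 1600 - 3).toNat).foldl pnA_fill (x1, x2)
  (List.range vector_len.toNat).foldl
    (fun out n => out.set n (PySem.Int.mod (q.1.getD (n+1600) 0 + q.2.getD (n+1600) 0) 2))
    (List.replicate vector_len.toNat 0)

-- ===== PORT B =====
-- _step from Source B: advance both 31-bit registers by one position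
def pnB_step (p : List Int × List Int) : List Int × List Int :=
  (p.1.drop 1 ++ [PySem.Int.mod (p.1.getD 3 0 + p.1.getD 0 0) 2],
   p.2.drop 1 ++ [PySem.Int.mod (p.2.getD 3 0 + p.2.getD 2 0 + p.2.getD 1 0 + p.2.getD 0 0) 2])

def pn_generator_alt (vector_len : Int) (cinit : Int) : List Int :=
  let x1 : List Int := 1 :: List.replicate 30 0
  let x2 := ((List.range 31).foldl
    (fun (p : List Int × Int) _ => (p.1 ++ [PySem.Int.mod p.2 2], PySem.Int.floordiv p.2 2))
    ([], cinit)).1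
  let q := (List.range 1600).foldl (fun p _ => pnB_step p) (x1, x2)
  ((List.range vector_len.toNat).foldl
    (fun (a : List Int × (List Int × List Int)) _ =>
      (a.1 ++ [PySem.Int.mod (a.2.1.getD 0 0 + a.2.2.getD 0 0) 2], pnB_step a.2))
    ([], q)).1

-- ===== PRECONDITION & SPEC =====
def Spec_pn_generator (vector_len : Int) (cinit : Int) (out : List Int) : Prop := out = pn_generator_alt vector_len cinit
instance (vector_len : Int) (cinit : Int) (out : List Int) : Decidable (Spec_pn_generator vector_len cinit out) := by unfold Spec_pn_generator; infer_instance

-- ===== CLAIM (what is proved, stated in full; the proofs are below) =====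
def Claim_equal_pn_generator : Prop := ∀ (vector_len : Int) (cinit : Int), Dom_pn_generator vector_len cinit → Spec_pn_generator vector_len cinit (pn_generator vector_len cinit)

-- ===== LEMMAS AND PROOFS =====

-- the iterated quotient c, c//2, c//4, …
def pvSeedC (cinit : Int) : Nat → Int
  | 0 => cinit
  | n+1 => PySem.Int.floordiv (pvSeedC cinit n) 2

-- the mathematical x1 sequence
def pvS1 (n : Nat) : Int :=
  if n < 31 then (if n = 0 then 1 else 0)
  else PySem.Int.mod (pvS1 (n-28) + pvS1 (n-31)) 2
termination_by n
decreasing_by all_goals omega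

-- the mathematical x2 sequence
def pvS2 (c : Int) (n : Nat) : Int :=
  if n < 31 then PySem.Int.mod (pvSeedC c n) 2
  else PySem.Int.mod (pvS2 c (n-28) + pvS2 c (n-29) + pvS2 c (n-30) + pvS2 c (n-31)) 2
termination_by n
decreasing_by all_goals omega

-- the common output value
def pvOut (c : Int) (n : Nat) : Int := PySem.Int.mod (pvS1 (1600+n) + pvS2 c (1600+n)) 2

-- the 31-bit window of a sequence starting at k
def pvWin (s : Nat → Int) (k : Nat) : List Int := (List.range 31).map (fun j => s (k+j))

lemma pvS1_rec (n : Nat) : pvS1 (n+31) = PySem.Int.mod (pvS1 (n+3) + pvS1 n) 2 := by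
  rw [pvS1]
  have h1 : n+31-28 = n+3 := by omega
  have h2 : n+31-31 = n := by omega
  simp [h1, h2]

lemma pvS2_rec (c : Int) (n : Nat) : pvS2 c (n+31) =
    PySem.Int.mod (pvS2 c (n+3) + pvS2 c (n+2) + pvS2 c (n+1) + pvS2 c n) 2 := by
  rw [pvS2]
  have h1 : n+31-28 = n+3 := by omega
  have h2 : n+31-29 = n+2 := by omega
  have h3 : n+31-30 = n+1 := by omega
  have h4 : n+31-31 = n := by omega
  simp [h1, h2, h3, h4]

-- getD on a window
lemma pvWin_getD (s : Nat → Int) (k j : Nat) (hj : j < 31) : (pvWin s k).getD j 0 = s (k+j) := by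
  simp [pvWin, List.getD_eq_getElem?_getD, hj]

-- advancing a window
lemma pvWin_shift (s : Nat → Int) (k : Nat) (v : Int) (hv : v = s (k+31)) :
    (pvWin s k).drop 1 ++ [v] = pvWin s (k+1) := by
  apply List.ext_getElem
  · simp [pvWin]
  · intro i h1 h2
    simp only [pvWin, List.length_map, List.length_range] at h2
    by_cases hi : i < 30
    · rw [List.getElem_append_left (by simp [pvWin]; omega)]
      simp only [pvWin, List.getElem_drop, List.getElem_map, List.getElem_range]
      congr 1
      omega
    · have : i = 30 := by omega
      subst this
      rw [List.getElem_append_right (by simp [pvWin])]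
      simp only [pvWin, List.length_drop, List.length_map, List.length_range, hv,
        List.getElem_singleton]
      congr 1

-- one B step on the pair of windows
lemma pnB_step_win (c : Int) (k : Nat) :
    pnB_step (pvWin pvS1 k, pvWin (pvS2 c) k) = (pvWin pvS1 (k+1), pvWin (pvS2 c) (k+1)) := by
  unfold pnB_step
  simp only
  rw [pvWin_getD _ _ 3 (by omega), pvWin_getD _ _ 0 (by omega),
      pvWin_getD _ _ 3 (by omega), pvWin_getD _ _ 2 (by omega),
      pvWin_getD _ _ 1 (by omega), pvWin_getD _ _ 0 (by omega)]
  rw [pvWin_shift pvS1 k _ (by rw [pvS1_rec]; simp),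
      pvWin_shift (pvS2 c) k _ (by rw [pvS2_rec]; simp)]

-- getD / set on "computed prefix ++ zero padding"
lemma getD_prefix (s : Nat → Int) (k i r : Nat) (hi : i < k) :
    ((List.range k).map s ++ List.replicate r (0:Int)).getD i 0 = s i := by
  rw [List.getD_eq_getElem?_getD, List.getElem?_append_left (by simp; omega)]
  simp [hi]

lemma set_prefix (s : Nat → Int) (k L : Nat) (v : Int) (hk : k < L) (hv : v = s k) :
    (((List.range k).map s ++ List.replicate (L-k) (0:Int)).set k v)
      = (List.range (k+1)).map s ++ List.replicate (L-(k+1)) (0:Int) := by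
  have hrep : List.replicate (L-k) (0:Int) = 0 :: List.replicate (L-(k+1)) 0 := by
    have : L - k = (L - (k+1)) + 1 := by omega
    rw [this, List.replicate_succ]
  rw [List.set_append_right _ _ (by simp), hrep]
  simp [List.range_succ, hv]

-- A's seed loop
lemma pnA_seed_loop (c : Int) (L : Nat) (hL : 31 ≤ L) (n : Nat) (hn : n ≤ 31) :
    (List.range n).foldl pnA_seed (List.replicate L 0, c)
      = ((List.range n).map (fun i => PySem.Int.mod (pvSeedC c i) 2) ++ List.replicate (L-n) 0,
         pvSeedC c n) := by
  induction n with
  | zero => simp [pvSeedC]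
  | succ m ih =>
    rw [show List.range (m+1) = List.range m ++ [m] from List.range_succ,
        List.foldl_append, ih (by omega)]
    simp only [List.foldl_cons, List.foldl_nil, pnA_seed, Prod.mk.injEq]
    refine ⟨?_, rfl⟩
    rw [set_prefix (fun i => PySem.Int.mod (pvSeedC c i) 2) m L _ (by omega) rfl,
        show List.range (m+1) = List.range m ++ [m] from List.range_succ]

-- A's fill loop
lemma pnA_fill_loop (c : Int) (L : Nat) (F : Nat) (hF : F + 31 ≤ L) :
    (List.range F).foldl pnA_fill
        ((List.range 31).map pvS1 ++ List.replicate (L-31) 0,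
         (List.range 31).map (pvS2 c) ++ List.replicate (L-31) 0)
      = ((List.range (F+31)).map pvS1 ++ List.replicate (L-(F+31)) 0,
         (List.range (F+31)).map (pvS2 c) ++ List.replicate (L-(F+31)) 0) := by
  induction F with
  | zero => simp
  | succ m ih =>
    rw [show List.range (m+1) = List.range m ++ [m] from List.range_succ,
        List.foldl_append, ih (by omega)]
    simp only [List.foldl_cons, List.foldl_nil, pnA_fill, Prod.mk.injEq]
    have hmm : m + 1 + 31 = (m + 31) + 1 := by omega
    constructor
    · rw [getD_prefix _ _ _ _ (by omega), getD_prefix _ _ _ _ (by omega)]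
      rw [set_prefix pvS1 (m+31) L _ (by omega) (by rw [pvS1_rec]), hmm]
    · rw [getD_prefix _ _ _ _ (by omega), getD_prefix _ _ _ _ (by omega),
          getD_prefix _ _ _ _ (by omega), getD_prefix _ _ _ _ (by omega)]
      rw [set_prefix (pvS2 c) (m+31) L _ (by omega) (by rw [pvS2_rec]), hmm]

-- A's output loop, generic "set each index of a zero list" shape
lemma foldl_set_range (g : Nat → Int) (V : Nat) (k : Nat) (hk : k ≤ V) :
    (List.range k).foldl (fun out n => out.set n (g n)) (List.replicate V (0:Int))
      = (List.range k).map g ++ List.replicate (V-k) 0 := by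
  induction k with
  | zero => simp
  | succ m ih =>
    rw [show List.range (m+1) = List.range m ++ [m] from List.range_succ,
        List.foldl_append, ih (by omega)]
    simp only [List.foldl_cons, List.foldl_nil]
    rw [set_prefix g m V _ (by omega) rfl,
        show List.range (m+1) = List.range m ++ [m] from List.range_succ]

-- B's seed loop
lemma pnB_seed_loop (c : Int) (n : Nat) :
    (List.range n).foldl
        (fun (p : List Int × Int) _ => (p.1 ++ [PySem.Int.mod p.2 2], PySem.Int.floordiv p.2 2))
        ([], c)
      = ((List.range n).map (fun i => PySem.Int.mod (pvSeedC c i) 2), pvSeedC c n) := by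
  induction n with
  | zero => simp [pvSeedC]
  | succ m ih =>
    rw [show List.range (m+1) = List.range m ++ [m] from List.range_succ,
        List.foldl_append, ih]
    simp [pvSeedC]

-- B's initial registers are the windows at 0
lemma pvS1_small (j : Nat) (h : j < 31) : pvS1 j = if j = 0 then 1 else 0 := by
  rw [pvS1, if_pos h]

lemma pnB_init1 : (1 :: List.replicate 30 (0:Int)) = pvWin pvS1 0 := by
  apply List.ext_getElem
  · simp [pvWin]
  · intro i h1 h2
    simp only [pvWin, List.getElem_map, List.getElem_range, Nat.zero_add]
    simp only [List.length_cons, List.length_replicate] at h1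
    rw [pvS1_small i (by omega)]
    rcases i with _ | j
    · rfl
    · rw [List.getElem_cons_succ, List.getElem_replicate, if_neg (by omega)]

lemma pnB_init2 (c : Int) :
    (List.range 31).map (fun i => PySem.Int.mod (pvSeedC c i) 2) = pvWin (pvS2 c) 0 := by
  apply List.ext_getElem
  · simp [pvWin]
  · intro i h1 h2
    simp only [List.length_map, List.length_range] at h1
    simp only [pvWin, List.getElem_map, List.getElem_range, Nat.zero_add]
    rw [pvS2, if_pos h1]

-- B's warm-up loop
lemma pnB_warm (c : Int) (m : Nat) :
    (List.range m).foldl (fun p _ => pnB_step p) (pvWin pvS1 0, pvWin (pvS2 c) 0)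
      = (pvWin pvS1 m, pvWin (pvS2 c) m) := by
  induction m with
  | zero => rfl
  | succ t ih =>
    rw [show List.range (t+1) = List.range t ++ [t] from List.range_succ,
        List.foldl_append, ih]
    simp [pnB_step_win]

-- B's output loop
lemma pnB_out (c : Int) (k : Nat) :
    (List.range k).foldl
        (fun (a : List Int × (List Int × List Int)) _ =>
          (a.1 ++ [PySem.Int.mod (a.2.1.getD 0 0 + a.2.2.getD 0 0) 2], pnB_step a.2))
        ([], (pvWin pvS1 1600, pvWin (pvS2 c) 1600))
      = ((List.range k).map (pvOut c), (pvWin pvS1 (1600+k), pvWin (pvS2 c) (1600+k))) := by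
  induction k with
  | zero => simp
  | succ t ih =>
    rw [show List.range (t+1) = List.range t ++ [t] from List.range_succ,
        List.foldl_append, ih]
    simp only [List.foldl_cons, List.foldl_nil, Prod.mk.injEq]
    constructor
    · rw [pvWin_getD _ _ 0 (by omega), pvWin_getD _ _ 0 (by omega)]
      simp [pvOut]
    · have := pnB_step_win c (1600+t)
      simp only [this]
      have h : 1600 + t + 1 = 1600 + (t+1) := by omega
      rw [h]

-- B computes map pvOut
lemma pnB_eq (v c : Int) : pn_generator_alt v c = (List.range v.toNat).map (pvOut c) := by
  unfold pn_generator_alt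
  simp only
  rw [pnB_seed_loop, pnB_init1, pnB_init2, pnB_warm, pnB_out]

-- A computes map pvOut
lemma pnA_eq (v c : Int) : pn_generator v c = (List.range v.toNat).map (pvOut c) := by
  unfold pn_generator
  simp only
  set vec : Int := if v < 32 then 32 else v with hvec
  have hvec32 : 32 ≤ vec := by rw [hvec]; split <;> omega
  have hL : (3 * vec + 1600).toNat = 3 * vec.toNat + 1600 := by omega
  have hFn : (2 * vec + 1600 - 3).toNat = 2 * vec.toNat + 1597 := by omega
  have hV : v.toNat ≤ vec.toNat := by rw [hvec]; split <;> omega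
  rw [hL, hFn]
  rw [pnA_seed_loop c _ (by omega) 31 (le_refl 31)]
  have hx1 : (List.replicate (3 * vec.toNat + 1600) (0:Int)).set 0 1
      = (List.range 31).map pvS1 ++ List.replicate (3 * vec.toNat + 1600 - 31) 0 := by
    have h1 : (31:Nat) ≤ 3 * vec.toNat + 1600 := by omega
    apply List.ext_getElem
    · simp; omega
    · intro i h1' h2'
      simp only [List.length_set, List.length_replicate] at h1'
      by_cases hi : i < 31
      · rw [List.getElem_append_left (by simp; omega)]
        simp only [List.getElem_map, List.getElem_range]
        rw [pvS1, if_pos hi]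
        rcases i with _ | j
        · simp
        · simp [List.getElem_replicate]
      · rw [List.getElem_append_right (by simp; omega)]
        simp [List.getElem_set, List.getElem_replicate]
        omega
  have hx2 : ((List.range 31).map (fun i => PySem.Int.mod (pvSeedC c i) 2)
        ++ List.replicate (3 * vec.toNat + 1600 - 31) (0:Int))
      = (List.range 31).map (pvS2 c) ++ List.replicate (3 * vec.toNat + 1600 - 31) 0 := by
    rw [pnB_init2]
    congr 1
  rw [hx1, hx2]
  have hLL : 3 * vec.toNat + 1600 - 31 = 3 * vec.toNat + 1600 - 31 := rfl
  rw [show (3 * vec.toNat + 1600 - 31) = (3 * vec.toNat + 1600) - 31 from rfl]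
  rw [pnA_fill_loop c (3 * vec.toNat + 1600) (2 * vec.toNat + 1597) (by omega)]
  -- output loop: the step function equals setting pvOut, pointwise on range v.toNat
  have hbody : ∀ (out : List Int) (n : Nat), n ∈ List.range v.toNat →
      out.set n (PySem.Int.mod
        ((((List.range (2 * vec.toNat + 1597 + 31)).map pvS1
            ++ List.replicate (3*vec.toNat+1600-(2*vec.toNat+1597+31)) 0).getD (n+1600) 0)
         + (((List.range (2 * vec.toNat + 1597 + 31)).map (pvS2 c)
            ++ List.replicate (3*vec.toNat+1600-(2*vec.toNat+1597+31)) 0).getD (n+1600) 0)) 2)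
      = out.set n (pvOut c n) := by
    intro out n hn
    rw [List.mem_range] at hn
    rw [getD_prefix _ _ _ _ (by omega), getD_prefix _ _ _ _ (by omega)]
    rw [pvOut, Nat.add_comm 1600 n]
  rw [PySem.List.foldl_congr_mem (List.range v.toNat) _
        (fun out n => out.set n (pvOut c n)) _ (fun acc n hn => hbody acc n hn)]
  rw [foldl_set_range (pvOut c) v.toNat v.toNat (le_refl _)]
  simp

-- ===== VERDICT (by name: the statement is the Claim_ definition above) =====
theorem pn_generator_spec : Claim_equal_pn_generator := by
  intro v c _
  show pn_generator v c = pn_generator_alt v c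
  rw [pnA_eq, pnB_eq]
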